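-- pv_equiv track=rewrite | github.com/Chudbrochil/Personal-Repo | Stanford/CS238/Project1_BayesianStructureLearning/project1.py | calc_q_i
-- ===== SOURCE A (Python) =====
-- def calc_q_i(parent_indices, r_distinct, row, r_distinct_values):
--     product = 1
--     q_i = 1
--     num_parents = len(parent_indices)
--
--     # We can have a column with distinct values [1,2,3,5]
--     # Because of this, we can't trivially just grab the value - 1 and use it.
--     for i in range(num_parents):
--         index = parent_indices[i]
--         # Getting the exact index of our instantiation among the distinct values in a column.
--         val = r_distinct_values[index].index(row[index])
--
--         r_i = r_distinct[index]
--         q_i += (product * val)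
--         product *= r_i
--
--     return q_i
-- ===== SOURCE B (Python) =====
-- def calc_q_i(parent_indices, r_distinct, row, r_distinct_values):
--     # Forward pass: collect (digit, radix) pairs, raising exactly as A would.
--     pairs = []
--     for index in parent_indices:
--         pairs.append((r_distinct_values[index].index(row[index]), r_distinct[index]))
--     # Horner evaluation of the mixed-radix number, last digit first.
--     acc = 0
--     for val, r_i in reversed(pairs):
--         acc = acc * r_i + val
--     return 1 + acc
-- ===== Notes on version B (the rewrite author's own statement) =====
-- stated objective: alternative
-- what changed: B collects (digit, radix) pairs in one forward pass and then evaluates the mixed-radix index with a single-accumulator Horner fold over the reversed pairs, instead of A's loop maintaining a running place-value product and a running sum.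
import Mathlib
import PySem

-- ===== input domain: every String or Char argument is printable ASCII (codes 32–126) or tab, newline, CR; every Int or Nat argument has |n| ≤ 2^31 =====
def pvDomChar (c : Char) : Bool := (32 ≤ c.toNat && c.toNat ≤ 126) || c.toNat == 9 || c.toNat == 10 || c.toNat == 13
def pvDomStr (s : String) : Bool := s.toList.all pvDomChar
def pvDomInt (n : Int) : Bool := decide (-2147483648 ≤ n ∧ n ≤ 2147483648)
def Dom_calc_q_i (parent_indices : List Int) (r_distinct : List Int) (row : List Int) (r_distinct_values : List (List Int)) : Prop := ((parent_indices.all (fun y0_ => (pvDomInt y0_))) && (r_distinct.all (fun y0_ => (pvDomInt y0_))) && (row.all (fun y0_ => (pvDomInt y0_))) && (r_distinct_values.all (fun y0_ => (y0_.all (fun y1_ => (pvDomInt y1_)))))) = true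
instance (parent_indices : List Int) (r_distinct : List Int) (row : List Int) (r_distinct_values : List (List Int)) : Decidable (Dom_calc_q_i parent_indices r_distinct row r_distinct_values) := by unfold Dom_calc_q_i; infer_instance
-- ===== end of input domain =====

-- B replaces A's two running accumulators (place-value product and sum) with one forward pass collecting (digit, radix) pairs followed by a reverse Horner fold with a single accumulator; objective: alternative decomposition, same cost.


-- ===== PORT A =====
-- Port of A: one forward fold keeping (running place-value product, running sum q_i).
def calc_q_i (parent_indices : List Int) (r_distinct : List Int) (row : List Int) (r_distinct_values : List (List Int)) : Int :=
  (parent_indices.foldl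
    (fun (st : Int × Int) (index : Int) =>
      (st.1 * ((PySem.List.pyGet? r_distinct index).getD 0),
       st.2 + st.1 * ((((PySem.List.pyGet? row index).bind
          (fun x => PySem.List.index? ((PySem.List.pyGet? r_distinct_values index).getD []) x)).getD 0 : Nat) : Int)))
    (1, 1)).2

-- ===== PORT B =====
-- Port of B: collect (digit, radix) pairs forward, then Horner-fold them in reverse with one accumulator.
def calc_q_i_alt (parent_indices : List Int) (r_distinct : List Int) (row : List Int) (r_distinct_values : List (List Int)) : Int :=
  let pairs : List (Nat × Int) := parent_indices.map
    (fun (index : Int) =>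
      ((((PySem.List.pyGet? row index).bind
          (fun x => PySem.List.index? ((PySem.List.pyGet? r_distinct_values index).getD []) x)).getD 0 : Nat),
       (PySem.List.pyGet? r_distinct index).getD 0))
  1 + pairs.reverse.foldl (fun (acc : Int) (p : Nat × Int) => acc * p.2 + (p.1 : Int)) 0

-- ===== PRECONDITION & SPEC =====
-- Pre_ excludes exactly the inputs where Python A raises: an index of parent_indices out of
-- range for r_distinct / r_distinct_values / row (IndexError), or row[index] missing from
-- r_distinct_values[index] (ValueError from .index).
def Pre_calc_q_i (parent_indices : List Int) (r_distinct : List Int) (row : List Int) (r_distinct_values : List (List Int)) : Prop :=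
  ∀ index ∈ parent_indices,
    (PySem.List.pyGet? r_distinct index).isSome = true ∧
    (PySem.List.pyGet? r_distinct_values index).isSome = true ∧
    (PySem.List.pyGet? row index).isSome = true ∧
    ((PySem.List.pyGet? row index).getD 0) ∈ ((PySem.List.pyGet? r_distinct_values index).getD [])
instance (parent_indices : List Int) (r_distinct : List Int) (row : List Int) (r_distinct_values : List (List Int)) : Decidable (Pre_calc_q_i parent_indices r_distinct row r_distinct_values) := by unfold Pre_calc_q_i; infer_instance
def pvWitness_calc_q_i : List Int × List Int × List Int × List (List Int) := ([0], [2], [1], [[1, 2]])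
def Spec_calc_q_i (parent_indices : List Int) (r_distinct : List Int) (row : List Int) (r_distinct_values : List (List Int)) (out : Int) : Prop := out = calc_q_i_alt parent_indices r_distinct row r_distinct_values
instance (parent_indices : List Int) (r_distinct : List Int) (row : List Int) (r_distinct_values : List (List Int)) (out : Int) : Decidable (Spec_calc_q_i parent_indices r_distinct row r_distinct_values out) := by unfold Spec_calc_q_i; infer_instance

-- ===== CLAIM (what is proved, stated in full; the proofs are below) =====
def Claim_equal_calc_q_i : Prop := ∀ (parent_indices : List Int) (r_distinct : List Int) (row : List Int) (r_distinct_values : List (List Int)), Dom_calc_q_i parent_indices r_distinct row r_distinct_values → Pre_calc_q_i parent_indices r_distinct row r_distinct_values → Spec_calc_q_i parent_indices r_distinct row r_distinct_values (calc_q_i parent_indices r_distinct row r_distinct_values)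

-- ===== LEMMAS AND PROOFS =====
-- Place-value accumulation over l equals Horner evaluation of the reversed digit list.
theorem pv_horner_key (g : Int → Nat × Int) (l : List Int) (prod q : Int) :
    (l.foldl (fun (st : Int × Int) (i : Int) => (st.1 * (g i).2, st.2 + st.1 * ((g i).1 : Int))) (prod, q)).2
    = q + prod * (((l.map g).reverse).foldl (fun (acc : Int) (p : Nat × Int) => acc * p.2 + (p.1 : Int)) 0) := by
  induction l generalizing prod q with
  | nil => simp
  | cons hd tl ih =>
    simp only [List.foldl_cons, List.map_cons, List.reverse_cons, List.foldl_append, List.foldl_cons, List.foldl_nil]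
    rw [ih]
    ring

-- ===== VERDICT (by name: the statement is the Claim_ definition above) =====
theorem calc_q_i_spec : Claim_equal_calc_q_i := by
  intro parent_indices r_distinct row r_distinct_values _ _
  unfold Spec_calc_q_i calc_q_i calc_q_i_alt
  rw [pv_horner_key (fun (index : Int) =>
        ((((PySem.List.pyGet? row index).bind
            (fun x => PySem.List.index? ((PySem.List.pyGet? r_distinct_values index).getD []) x)).getD 0 : Nat),
         (PySem.List.pyGet? r_distinct index).getD 0))]
  ring
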